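-- pv_equiv track=rewrite | github.com/Wulfic/Cicada3301 | Tools/gap_pattern_analysis.py | generate_gap_key
-- ===== SOURCE A (Python) =====
-- def generate_gap_key(start, gaps, length):
--     """Generate a key using gap pattern."""
--     key = [start]
--     gap_idx = 0
--
--     while len(key) < length:
--         next_val = (key[-1] + gaps[gap_idx % len(gaps)]) % 29
--         key.append(next_val)
--         gap_idx += 1
--
--     return key
-- ===== SOURCE B (Python) =====
-- def generate_gap_key(start, gaps, length):
--     """Generate a key using gap pattern."""
--     if length <= 1:
--         return [start]
--     sums = []
--     total = 0
--     for i in range(length - 1):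
--         total += gaps[i % len(gaps)]
--         sums.append(total)
--     return [start] + [(start + s) % 29 for s in sums]
-- ===== Notes on version B (the rewrite author's own statement) =====
-- stated objective: alternative
-- what changed: B first guards length<=1, then maintains raw (unreduced) cumulative gap sums in one pass and applies the mod 29 once per element on top of the untouched start, instead of A's while-loop that chains the mod through key[-1] at every step.
import Mathlib
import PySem

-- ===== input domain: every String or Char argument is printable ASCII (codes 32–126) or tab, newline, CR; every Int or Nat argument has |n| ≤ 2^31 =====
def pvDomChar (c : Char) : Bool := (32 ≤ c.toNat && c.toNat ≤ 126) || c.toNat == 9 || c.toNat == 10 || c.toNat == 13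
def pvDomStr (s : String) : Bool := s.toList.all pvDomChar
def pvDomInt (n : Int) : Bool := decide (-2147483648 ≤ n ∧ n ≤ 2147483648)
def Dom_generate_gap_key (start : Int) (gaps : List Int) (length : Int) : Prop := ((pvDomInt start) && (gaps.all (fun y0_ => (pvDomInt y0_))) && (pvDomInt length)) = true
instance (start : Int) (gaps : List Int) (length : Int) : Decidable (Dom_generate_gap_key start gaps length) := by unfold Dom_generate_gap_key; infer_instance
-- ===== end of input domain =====

-- B guards length<=1 and maintains raw cumulative gap sums, applying % 29 once per element,
-- instead of A's while-loop chaining the mod through key[-1]; objective: alternative decomposition.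


-- ===== PORT A =====
-- the while loop: runs while key.length < length; fuel length.toNat bounds the iterations
def genAloop (gaps : List Int) (length : Int) : Nat → List Int → Nat → List Int
  | 0, key, _ => key
  | f + 1, key, gap_idx =>
    if (key.length : Int) < length then
      -- next_val = (key[-1] + gaps[gap_idx % len(gaps)]) % 29 ; key nonempty and gaps nonempty under Pre_
      let next_val := PySem.Int.mod ((PySem.List.pyGet? key (-1)).getD 0 + gaps.getD (gap_idx % gaps.length) 0) 29
      genAloop gaps length f (key ++ [next_val]) (gap_idx + 1)
    else key

def generate_gap_key (start : Int) (gaps : List Int) (length : Int) : List Int :=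
  genAloop gaps length length.toNat [start] 0

-- ===== PORT B =====
-- the accumulation loop of Source B: running raw total of cyclic gaps, collected into sums
def genBsums (gaps : List Int) (total : Int) : List Nat → List Int
  | [] => []
  | i :: is =>
    let t := total + gaps.getD (i % gaps.length) 0
    t :: genBsums gaps t is

def generate_gap_key_alt (start : Int) (gaps : List Int) (length : Int) : List Int :=
  if length ≤ 1 then [start]
  else
    let sums := genBsums gaps 0 (List.range (length - 1).toNat)
    start :: sums.map (fun s => PySem.Int.mod (start + s) 29)

-- ===== PRECONDITION & SPEC =====
-- Pre_ excludes exactly the inputs where Python A raises: gaps = [] with length > 1 (ZeroDivisionError on gap_idx % len(gaps))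
def Pre_generate_gap_key (start : Int) (gaps : List Int) (length : Int) : Prop :=
  gaps ≠ [] ∨ length ≤ 1
instance (start : Int) (gaps : List Int) (length : Int) : Decidable (Pre_generate_gap_key start gaps length) := by unfold Pre_generate_gap_key; infer_instance
def pvWitness_generate_gap_key : Int × List Int × Int := (3, [2, 5], 6)

def Spec_generate_gap_key (start : Int) (gaps : List Int) (length : Int) (out : List Int) : Prop := out = generate_gap_key_alt start gaps length
instance (start : Int) (gaps : List Int) (length : Int) (out : List Int) : Decidable (Spec_generate_gap_key start gaps length out) := by unfold Spec_generate_gap_key; infer_instance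

-- ===== CLAIM (what is proved, stated in full; the proofs are below) =====
def Claim_equal_generate_gap_key : Prop := ∀ (start : Int) (gaps : List Int) (length : Int), Dom_generate_gap_key start gaps length → Pre_generate_gap_key start gaps length → Spec_generate_gap_key start gaps length (generate_gap_key start gaps length)

-- ===== LEMMAS AND PROOFS =====

-- A's loop, rewritten tail: each step appends (last + g idx) % 29
def pvBuild (gaps : List Int) (last : Int) (idx : Nat) : Nat → List Int
  | 0 => []
  | m + 1 =>
    let next := PySem.Int.mod (last + gaps.getD (idx % gaps.length) 0) 29
    next :: pvBuild gaps next (idx + 1) m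

theorem pvGenAloop_eq_build (gaps : List Int) (length : Int) :
    ∀ (f : Nat) (pre : List Int) (x : Int) (idx : Nat),
      (length - (pre.length + 1) : Int) ≤ f →
      genAloop gaps length f (pre ++ [x]) idx
        = (pre ++ [x]) ++ pvBuild gaps x idx (length - (pre.length + 1)).toNat := by
  intro f
  induction f with
  | zero =>
    intro pre x idx h
    have : (length - (pre.length + 1)).toNat = 0 := by omega
    simp [genAloop, this, pvBuild]
  | succ f ih =>
    intro pre x idx h
    by_cases hlt : ((pre ++ [x]).length : Int) < length
    · have hlen : ((pre ++ [x]).length : Int) = pre.length + 1 := by simp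
      have hm : (length - (pre.length + 1)).toNat
          = (length - ((pre ++ [x]).length + 1)).toNat + 1 := by
        simp at hlt; omega
      rw [genAloop]
      simp only [hlt, if_pos]
      rw [PySem.List.pyGet?_neg_one_append_singleton]
      have := ih (pre ++ [x])
        (PySem.Int.mod (x + gaps.getD (idx % gaps.length) 0) 29) (idx + 1)
        (by simp at hlt ⊢; omega)
      simp only [Option.getD_some]
      rw [this, hm, pvBuild]
      simp
    · have h0 : (length - (pre.length + 1)).toNat = 0 := by
        have := hlt; simp at this; omega
      rw [genAloop, if_neg hlt, h0]
      simp [pvBuild]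

theorem pvMod_chain (a b : Int) :
    PySem.Int.mod (PySem.Int.mod a 29 + b) 29 = PySem.Int.mod (a + b) 29 := by
  have h : (0:Int) < 29 := by norm_num
  simp only [PySem.Int.mod_eq_emod_of_pos h, Int.emod_add_emod]

-- running sums shift by the starting accumulator
theorem pvGenBsums_shift (gaps : List Int) (a : Int) :
    ∀ is : List Nat, genBsums gaps a is = (genBsums gaps 0 is).map (fun s => a + s) := by
  intro is
  induction is generalizing a with
  | nil => simp [genBsums]
  | cons i is ih =>
    simp only [genBsums, List.map_cons, zero_add]
    congr 1
    rw [ih, ih (gaps.getD (i % gaps.length) 0), List.map_map]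
    apply List.map_congr_left
    intro s _
    simp [Function.comp]
    ring

theorem pvBuild_eq_sums (gaps : List Int) :
    ∀ (m idx : Nat) (x : Int),
      pvBuild gaps x idx m
        = (genBsums gaps 0 (List.range' idx m)).map (fun s => PySem.Int.mod (x + s) 29) := by
  intro m
  induction m with
  | zero => intro idx x; simp [pvBuild, genBsums]
  | succ m ih =>
    intro idx x
    rw [List.range'_succ]
    simp only [pvBuild, genBsums, List.map_cons, zero_add]
    congr 1
    rw [pvGenBsums_shift gaps (gaps.getD (idx % gaps.length) 0),
        ih (idx + 1) (PySem.Int.mod (x + gaps.getD (idx % gaps.length) 0) 29), List.map_map]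
    apply List.map_congr_left
    intro s _
    simp only [Function.comp]
    rw [pvMod_chain, add_assoc]

-- ===== VERDICT (by name: the statement is the Claim_ definition above) =====
theorem generate_gap_key_spec : Claim_equal_generate_gap_key := by
  intro start gaps length _ _
  unfold Spec_generate_gap_key generate_gap_key generate_gap_key_alt
  by_cases h1 : length ≤ 1
  · -- at most one element: the while loop never appends
    rw [if_pos h1]
    rcases Nat.eq_zero_or_pos length.toNat with h0 | hp
    · simp [genAloop, h0]
    · have h1' : length.toNat = 1 := by omega
      have hc : ¬ ((([start] : List Int).length : Int) < length) := by simp; omega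
      rw [h1', genAloop, if_neg hc]
  · rw [if_neg h1]
    have := pvGenAloop_eq_build gaps length length.toNat [] start 0 (by simp only [List.length_nil, Nat.cast_zero]; omega)
    simp only [List.nil_append] at this
    rw [this, pvBuild_eq_sums, List.range_eq_range']
    have hm : (length - ((([] : List Int)).length + 1) : Int).toNat = (length - 1).toNat := by
      simp
    rw [hm]
    simp
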